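-- pv_equiv track=rewrite | github.com/EchuCompa/pasantia-BICC | asvFormula/classesSizes/recursiveFormula.py | getPossibleCombinations
-- ===== SOURCE A (Python) =====
-- from typing import List, Dict, Any, Tuple
--
-- def getPossibleCombinations(leftElementsOfClasses: List[int], elementsToSelect: int) -> List[List[int]]:
--     def backtrack(index, current_combination, current_sum, maximumAmount):
--         # If the current sum equals the required elementsToSelect, add the combination to the result
--         if current_sum == elementsToSelect:
--             result.append(list(current_combination))
--             return
--
--         if current_sum > elementsToSelect or index == len(leftElementsOfClasses) or current_sum + maximumAmount < elementsToSelect: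
--             return
--
--         for value in range(leftElementsOfClasses[index] + 1):
--             current_combination.append(value)
--             backtrack(index + 1, current_combination, current_sum + value, maximumAmount - leftElementsOfClasses[index])
--             current_combination.pop()
--
--     result = []
--     backtrack(0, [], 0, sum(leftElementsOfClasses))
--     return result
-- ===== SOURCE B (Python) =====
-- def getPossibleCombinations(leftElementsOfClasses, elementsToSelect):
--     # Iterative breadth-first sweep over the classes: a frontier of
--     # (combination, sum, finished) triples replaces A's DFS backtracking.
--     maxRemaining = sum(leftElementsOfClasses)
--     items = [([], 0, False)]
--     for cap in leftElementsOfClasses: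
--         nxt = []
--         for combo, s, done in items:
--             if done:
--                 nxt.append((combo, s, True))
--             elif s == elementsToSelect:
--                 nxt.append((combo, s, True))
--             elif s > elementsToSelect or s + maxRemaining < elementsToSelect:
--                 pass
--             else:
--                 for value in range(cap + 1):
--                     nxt.append((combo + [value], s + value, False))
--         items = nxt
--         maxRemaining -= cap
--     return [combo for combo, s, done in items if done or s == elementsToSelect]
-- ===== Notes on version B (the rewrite author's own statement) =====
-- stated objective: alternative
-- what changed: Replaced A's depth-first backtracking over a shared mutable accumulator (append/recurse/pop) with an iterative breadth-first sweep: a frontier of (combination, sum, finished) triples is expanded class by class and filtered at the end.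
import Mathlib
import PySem

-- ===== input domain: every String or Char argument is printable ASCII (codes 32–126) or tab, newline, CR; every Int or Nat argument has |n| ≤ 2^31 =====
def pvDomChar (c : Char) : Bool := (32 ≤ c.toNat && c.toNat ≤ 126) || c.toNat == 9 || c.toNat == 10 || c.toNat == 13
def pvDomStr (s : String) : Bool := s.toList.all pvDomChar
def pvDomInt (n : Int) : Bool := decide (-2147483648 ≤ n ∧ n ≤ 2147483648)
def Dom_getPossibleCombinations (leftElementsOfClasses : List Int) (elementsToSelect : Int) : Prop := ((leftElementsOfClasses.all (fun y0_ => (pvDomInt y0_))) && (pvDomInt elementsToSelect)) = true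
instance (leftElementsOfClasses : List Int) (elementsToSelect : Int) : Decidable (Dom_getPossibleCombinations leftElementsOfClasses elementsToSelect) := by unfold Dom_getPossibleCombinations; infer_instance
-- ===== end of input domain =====

-- B replaces A's DFS backtracking over a shared mutable accumulator with an iterative
-- breadth-first sweep over the classes, maintaining a frontier of (combination, sum,
-- finished) triples (objective: alternative decomposition, same cost).

-- ===== PORT A =====
-- A's `index` into the list is ported as the suffix `rest` = leftElementsOfClasses[index:]
-- (so `index == len(...)` is `rest = []` and `leftElementsOfClasses[index]` is `rest.headD 0`,
-- taken only when rest ≠ []); otherwise a literal transliteration of `backtrack`.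
def pvBacktrackA (target : Int) (rest cur : List Int) (curSum maxAmt : Int)
    (result : List (List Int)) : List (List Int) :=
  if curSum = target then result ++ [cur]
  else if h : curSum > target ∨ rest = [] ∨ curSum + maxAmt < target then result
  else
    (PySem.List.pyRange 0 (rest.headD 0 + 1) 1).foldl
      (fun res value =>
        pvBacktrackA target rest.tail (cur ++ [value]) (curSum + value)
          (maxAmt - rest.headD 0) res) result
termination_by rest.length
decreasing_by
  cases rest with
  | nil => exact absurd (Or.inr (Or.inl rfl)) h
  | cons a as => simp

def getPossibleCombinations (leftElementsOfClasses : List Int) (elementsToSelect : Int) : List (List Int) :=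
  pvBacktrackA elementsToSelect leftElementsOfClasses [] 0 leftElementsOfClasses.sum []

-- ===== PORT B =====
-- A frontier item (combo, s, done); one pass of the inner `for combo, s, done in items` loop.
def pvStepB (target maxRemaining cap : Int)
    (items : List (List Int × Int × Bool)) : List (List Int × Int × Bool) :=
  items.foldl (fun nxt it =>
    if it.2.2 then nxt ++ [(it.1, it.2.1, true)]
    else if it.2.1 = target then nxt ++ [(it.1, it.2.1, true)]
    else if it.2.1 > target ∨ it.2.1 + maxRemaining < target then nxt
    else (PySem.List.pyRange 0 (cap + 1) 1).foldl
      (fun nxt value => nxt ++ [(it.1 ++ [value], it.2.1 + value, false)]) nxt) []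

def getPossibleCombinations_alt (leftElementsOfClasses : List Int) (elementsToSelect : Int) : List (List Int) :=
  let final := (leftElementsOfClasses.foldl
      (fun (st : List (List Int × Int × Bool) × Int) cap =>
        (pvStepB elementsToSelect st.2 cap st.1, st.2 - cap))
      ([([], 0, false)], leftElementsOfClasses.sum)).1
  (final.filter (fun it => it.2.2 || it.2.1 == elementsToSelect)).map (fun it => it.1)

-- ===== PRECONDITION & SPEC =====
def Spec_getPossibleCombinations (leftElementsOfClasses : List Int) (elementsToSelect : Int) (out : List (List Int)) : Prop := out = getPossibleCombinations_alt leftElementsOfClasses elementsToSelect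
instance (leftElementsOfClasses : List Int) (elementsToSelect : Int) (out : List (List Int)) : Decidable (Spec_getPossibleCombinations leftElementsOfClasses elementsToSelect out) := by unfold Spec_getPossibleCombinations; infer_instance

-- ===== CLAIM (what is proved, stated in full; the proofs are below) =====
def Claim_equal_getPossibleCombinations : Prop := ∀ (leftElementsOfClasses : List Int) (elementsToSelect : Int), Dom_getPossibleCombinations leftElementsOfClasses elementsToSelect → Spec_getPossibleCombinations leftElementsOfClasses elementsToSelect (getPossibleCombinations leftElementsOfClasses elementsToSelect)

-- ===== LEMMAS AND PROOFS =====

-- Pure (accumulator-free) form of A's DFS, the common yardstick of both proofs.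
def pvDFS (target : Int) (rest cur : List Int) (s m : Int) : List (List Int) :=
  if s = target then [cur]
  else if h : s > target ∨ rest = [] ∨ s + m < target then []
  else
    (PySem.List.pyRange 0 (rest.headD 0 + 1) 1).flatMap
      (fun v => pvDFS target rest.tail (cur ++ [v]) (s + v) (m - rest.headD 0))
termination_by rest.length
decreasing_by
  cases rest with
  | nil => exact absurd (Or.inr (Or.inl rfl)) h
  | cons a as => simp

-- A's backtracking with accumulator computes the pure DFS, appended to the accumulator.
lemma pvBacktrack_eq_dfs (target : Int) :
    ∀ (rest cur : List Int) (s m : Int) (result : List (List Int)),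
      pvBacktrackA target rest cur s m result = result ++ pvDFS target rest cur s m := by
  intro rest
  induction rest with
  | nil =>
    intro cur s m result
    rw [pvBacktrackA, pvDFS]
    by_cases h0 : s = target
    · simp [h0]
    · simp [h0]
  | cons a as ih =>
    intro cur s m result
    rw [pvBacktrackA, pvDFS]
    by_cases h0 : s = target
    · simp [h0]
    · rw [if_neg h0, if_neg h0]
      by_cases h2 : s > target ∨ (a :: as : List Int) = [] ∨ s + m < target
      · rw [dif_pos h2, dif_pos h2]; simp
      · rw [dif_neg h2, dif_neg h2]
        simp only [List.headD_cons, List.tail_cons]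
        induction PySem.List.pyRange 0 (a + 1) 1 generalizing result with
        | nil => simp
        | cons v vs ihv =>
          simp only [List.foldl_cons, List.flatMap_cons]
          rw [ihv, ih, List.append_assoc]

-- the contribution of one frontier item, given the classes still to process
def pvContrib (target : Int) (rest : List Int) (m : Int)
    (it : List Int × Int × Bool) : List (List Int) :=
  if it.2.2 then [it.1] else pvDFS target rest it.1 it.2.1 m

lemma foldl_append_singleton {α β : Type} (f : α → β) :
    ∀ (l : List α) (acc : List β), l.foldl (fun acc x => acc ++ [f x]) acc = acc ++ l.map f := by
  intro l
  induction l with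
  | nil => simp
  | cons x xs ih => intro acc; simp [ih, List.append_assoc]

-- one frontier step expands each item into exactly its per-class children
lemma pvStepB_eq (target m cap : Int) (items : List (List Int × Int × Bool)) :
    pvStepB target m cap items
      = items.flatMap (fun it =>
          if it.2.2 then [(it.1, it.2.1, true)]
          else if it.2.1 = target then [(it.1, it.2.1, true)]
          else if it.2.1 > target ∨ it.2.1 + m < target then []
          else (PySem.List.pyRange 0 (cap + 1) 1).map
            (fun v => (it.1 ++ [v], it.2.1 + v, false))) := by
  suffices h : ∀ acc, items.foldl (fun nxt it =>
      if it.2.2 then nxt ++ [(it.1, it.2.1, true)]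
      else if it.2.1 = target then nxt ++ [(it.1, it.2.1, true)]
      else if it.2.1 > target ∨ it.2.1 + m < target then nxt
      else (PySem.List.pyRange 0 (cap + 1) 1).foldl
        (fun nxt value => nxt ++ [(it.1 ++ [value], it.2.1 + value, false)]) nxt) acc
      = acc ++ items.flatMap (fun it =>
          if it.2.2 then [(it.1, it.2.1, true)]
          else if it.2.1 = target then [(it.1, it.2.1, true)]
          else if it.2.1 > target ∨ it.2.1 + m < target then []
          else (PySem.List.pyRange 0 (cap + 1) 1).map
            (fun v => (it.1 ++ [v], it.2.1 + v, false))) by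
    unfold pvStepB; rw [h]; simp
  induction items with
  | nil => intro acc; simp
  | cons it its ih =>
    intro acc
    simp only [List.foldl_cons, List.flatMap_cons]
    split_ifs with h1 h2 h3
    · rw [ih]; simp [List.append_assoc]
    · rw [ih]; simp [List.append_assoc]
    · rw [ih]; simp
    · rw [foldl_append_singleton, ih]; simp [List.append_assoc]

-- main invariant: folding the remaining classes over a frontier yields the
-- concatenated contributions, after the final filter/map.
lemma pvFold_invariant (target : Int) :
    ∀ (rest : List Int) (items : List (List Int × Int × Bool)) (m : Int),
      (((rest.foldl (fun (st : List (List Int × Int × Bool) × Int) cap =>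
          (pvStepB target st.2 cap st.1, st.2 - cap)) (items, m)).1.filter
            (fun it => it.2.2 || it.2.1 == target)).map (fun it => it.1))
        = items.flatMap (pvContrib target rest m) := by
  intro rest
  induction rest with
  | nil =>
    intro items m
    simp only [List.foldl_nil]
    induction items with
    | nil => simp
    | cons it its ih =>
      simp only [List.filter_cons, List.flatMap_cons]
      rw [← ih]
      by_cases hd : it.2.2
      · simp [pvContrib, hd]
      · by_cases hs : it.2.1 = target
        · simp [pvContrib, hd, hs, pvDFS]
        · have : pvDFS target [] it.1 it.2.1 m = [] := by
            rw [pvDFS]; simp [hs]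
          simp [pvContrib, hd, hs, this]
  | cons cap rest ih =>
    intro items m
    simp only [List.foldl_cons]
    rw [ih, pvStepB_eq, List.flatMap_assoc]
    apply List.flatMap_congr  -- pointwise equality of contributions
    intro it _
    by_cases hd : it.2.2
    · simp [pvContrib, hd]
    · by_cases hs : it.2.1 = target
      · simp [pvContrib, hd, hs, pvDFS]
      · by_cases hp : it.2.1 > target ∨ it.2.1 + m < target
        · have hc : it.2.1 > target ∨ (cap :: rest : List Int) = [] ∨ it.2.1 + m < target := by
            rcases hp with h | h
            · exact Or.inl h
            · exact Or.inr (Or.inr h)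
          have hnil : pvDFS target (cap :: rest) it.1 it.2.1 m = [] := by
            rw [pvDFS, if_neg hs, dif_pos hc]
          simp [pvContrib, hd, hs, hp, hnil]
        · have hrhs : pvDFS target (cap :: rest) it.1 it.2.1 m
              = (PySem.List.pyRange 0 (cap + 1) 1).flatMap
                  (fun v => pvDFS target rest (it.1 ++ [v]) (it.2.1 + v) (m - cap)) := by
            rw [pvDFS]
            have h2 : ¬ (it.2.1 > target ∨ (cap :: rest : List Int) = [] ∨ it.2.1 + m < target) := by
              rcases not_or.mp hp with ⟨h1, h2⟩
              exact not_or.mpr ⟨h1, not_or.mpr ⟨by simp, h2⟩⟩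
            rw [if_neg hs, dif_neg h2]
            simp
          have hl : pvContrib target (cap :: rest) m it
              = pvDFS target (cap :: rest) it.1 it.2.1 m := by
            simp [pvContrib, hd]
          simp only [hd, hs, hp, if_false, Bool.false_eq_true, hl, hrhs, List.flatMap_map]
          simp [pvContrib]

-- ===== VERDICT (by name: the statement is the Claim_ definition above) =====
theorem getPossibleCombinations_spec : Claim_equal_getPossibleCombinations := by
  intro arr t _
  unfold Spec_getPossibleCombinations getPossibleCombinations getPossibleCombinations_alt
  rw [pvBacktrack_eq_dfs, pvFold_invariant]
  simp [pvContrib]
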